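-- pv_equiv track=rewrite | github.com/Hsnayrus/Coding_Practice | 202/Solution.py | numberToSumOfSquaredDigits
-- ===== SOURCE A (Python) =====
-- def numberToSumOfSquaredDigits(n: int) -> int:
--     temp = n
--     result = 0
--     while True:
--         if n < 1:
--             break
--         result = result + ((n % 10) * (n % 10))
--         n = int(n / 10)
--     return result
-- ===== SOURCE B (Python) =====
-- def numberToSumOfSquaredDigits(n: int) -> int:
--     if n < 1:
--         return 0
--     return sum(int(d) ** 2 for d in str(n))
-- ===== Notes on version B (the rewrite author's own statement) =====
-- stated objective: simpler
-- what changed: Replaces the mod/div peel-off loop with a guard plus a one-line sum of squared digits over the decimal string representation.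
import Mathlib
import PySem

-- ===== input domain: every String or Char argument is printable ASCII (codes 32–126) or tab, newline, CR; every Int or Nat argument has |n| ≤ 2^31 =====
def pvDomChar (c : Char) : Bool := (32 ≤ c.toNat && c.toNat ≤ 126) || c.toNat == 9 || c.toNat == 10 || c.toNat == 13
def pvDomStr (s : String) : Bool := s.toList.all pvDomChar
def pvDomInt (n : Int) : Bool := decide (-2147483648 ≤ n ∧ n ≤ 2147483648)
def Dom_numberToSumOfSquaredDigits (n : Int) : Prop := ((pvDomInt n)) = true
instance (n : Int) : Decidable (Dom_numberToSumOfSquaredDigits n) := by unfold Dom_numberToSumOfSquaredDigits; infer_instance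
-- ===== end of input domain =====

-- B replaces A's mod/div peel-off loop with a sum of squared digits over the decimal string; objective: simpler.


-- ===== PORT A =====
-- the 'while True' loop: state (n, result); 'int(n / 10)' is PySem.Int.truncdiv, 'n % 10' is PySem.Int.mod
def numberToSumOfSquaredDigitsLoop (n result : Int) : Int :=
  if n < 1 then result
  else numberToSumOfSquaredDigitsLoop (PySem.Int.truncdiv n 10)
         (result + (PySem.Int.mod n 10) * (PySem.Int.mod n 10))
termination_by n.toNat
decreasing_by
  simp only [PySem.Int.truncdiv]
  rename_i h
  have := Int.tdiv_eq_ediv_of_nonneg (a := n) (b := 10) (by omega)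
  omega

def numberToSumOfSquaredDigits (n : Int) : Int :=
  let _temp := n
  numberToSumOfSquaredDigitsLoop n 0

-- ===== PORT B =====
-- int(d) for a single decimal-digit character d (exact on the digit chars produced by str(n), n ≥ 1)
def pyDigitVal (c : Char) : Int := (c.toNat : Int) - 48

def numberToSumOfSquaredDigits_alt (n : Int) : Int :=
  if n < 1 then 0
  else ((PySem.Int.toStr n).toList.map (fun c => pyDigitVal c ^ 2)).sum

-- ===== PRECONDITION & SPEC =====
def Spec_numberToSumOfSquaredDigits (n : Int) (out : Int) : Prop := out = numberToSumOfSquaredDigits_alt n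
instance (n : Int) (out : Int) : Decidable (Spec_numberToSumOfSquaredDigits n out) := by unfold Spec_numberToSumOfSquaredDigits; infer_instance

-- ===== CLAIM (what is proved, stated in full; the proofs are below) =====
def Claim_equal_numberToSumOfSquaredDigits : Prop := ∀ (n : Int), Dom_numberToSumOfSquaredDigits n → Spec_numberToSumOfSquaredDigits n (numberToSumOfSquaredDigits n)

-- ===== LEMMAS AND PROOFS =====

-- mathematical digit-square sum, the common meaning of both programs
def sumsqNat (n : Nat) : Int :=
  if n = 0 then 0 else ((n % 10 : Nat) : Int) ^ 2 + sumsqNat (n / 10)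
decreasing_by exact Nat.div_lt_self (Nat.pos_of_ne_zero (by assumption)) (by norm_num)

lemma sumsqNat_zero : sumsqNat 0 = 0 := by rw [sumsqNat]; rfl

lemma sumsqNat_pos (n : Nat) (h : n ≠ 0) :
    sumsqNat n = ((n % 10 : Nat) : Int) ^ 2 + sumsqNat (n / 10) := by
  rw [sumsqNat, if_neg h]

lemma digitVal_digitChar (k : Nat) (hk : k < 10) :
    pyDigitVal (Nat.digitChar k) = (k : Int) := by
  interval_cases k <;> decide

lemma sum_toDigitsCore (f : Nat) : ∀ (n : Nat) (ds : List Char), n < f →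
    ((Nat.toDigitsCore 10 f n ds).map (fun c => pyDigitVal c ^ 2)).sum
      = sumsqNat n + ((ds.map (fun c => pyDigitVal c ^ 2)).sum) := by
  induction f with
  | zero => intro n ds h; omega
  | succ f ih =>
    intro n ds h
    rw [Nat.toDigitsCore]
    have hd := digitVal_digitChar (n % 10) (Nat.mod_lt _ (by norm_num))
    by_cases h0 : n / 10 = 0
    · rw [if_pos h0]
      by_cases hz : n = 0
      · subst hz; simp [sumsqNat_zero, hd]
      · rw [sumsqNat_pos n hz, h0, sumsqNat_zero]
        simp [hd]
    · rw [if_neg h0]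
      have hlt : n / 10 < f := by
        have := Nat.div_lt_self (Nat.pos_of_ne_zero (by omega)) (by norm_num : (1:Nat) < 10)
        omega
      rw [ih (n / 10) _ hlt, sumsqNat_pos n (by omega)]
      simp [hd]
      ring

lemma trunc_cast (n : Nat) : PySem.Int.truncdiv (n : Int) 10 = ((n / 10 : Nat) : Int) := by
  simp only [PySem.Int.truncdiv,
    Int.tdiv_eq_ediv_of_nonneg (by positivity : (0:Int) ≤ (n:Int))]
  omega

lemma mod_cast10 (n : Nat) : PySem.Int.mod (n : Int) 10 = ((n % 10 : Nat) : Int) := by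
  simp only [PySem.Int.mod, Int.fmod_eq_emod]
  simp

lemma loop_eq (n : Nat) : ∀ (r : Int), numberToSumOfSquaredDigitsLoop (n : Int) r = r + sumsqNat n := by
  induction n using Nat.strong_induction_on with
  | _ n ih =>
    intro r
    rw [numberToSumOfSquaredDigitsLoop]
    by_cases h : (n : Int) < 1
    · have hz : n = 0 := by omega
      subst hz
      simp [sumsqNat_zero]
    · rw [if_neg h, trunc_cast, mod_cast10,
        ih (n / 10) (Nat.div_lt_self (by omega) (by norm_num))]
      rw [sumsqNat_pos n (by omega)]
      push_cast
      ring

-- ===== VERDICT (by name: the statement is the Claim_ definition above) =====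
theorem numberToSumOfSquaredDigits_spec : Claim_equal_numberToSumOfSquaredDigits := by
  intro n _
  unfold Spec_numberToSumOfSquaredDigits numberToSumOfSquaredDigits numberToSumOfSquaredDigits_alt
  by_cases h : n < 1
  · rw [numberToSumOfSquaredDigitsLoop, if_pos h, if_pos h]
  · rw [if_neg h]
    have hn : n = ((n.toNat : Nat) : Int) := by omega
    rw [hn, loop_eq, PySem.Int.toList_toStr, PySem.Int.toChars,
      if_neg (by omega : ¬ ((n.toNat : Nat) : Int) < 0)]
    rw [Int.toNat_natCast, Nat.toDigits,
      sum_toDigitsCore (n.toNat + 1) n.toNat [] (by omega)]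
    simp
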